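-- pv_equiv track=rewrite | github.com/MrBrantCode/unitest_baseline | mut_generate/mist_train_cf/cf_64392/solution.py | lowercase_except_4th_multiple_of_5
-- ===== SOURCE A (Python) =====
-- def lowercase_except_4th_multiple_of_5(input_string):
--     if len(input_string) % 5 != 0:
--         return input_string.lower()
--
--     output_string = ""
--     for i in range(len(input_string)):
--         if (i+1) % 4 != 0:
--             output_string += input_string[i].lower()
--         else:
--             output_string += input_string[i]
--
--     return output_string
-- ===== SOURCE B (Python) =====
-- def lowercase_except_4th_multiple_of_5(input_string):
--     if len(input_string) % 5 != 0:
--         return input_string.lower()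
--     pieces = []
--     rest = input_string
--     while rest:
--         pieces.append(rest[:3].lower() + rest[3:4])
--         rest = rest[4:]
--     return "".join(pieces)
-- ===== Notes on version B (the rewrite author's own statement) =====
-- stated objective: alternative
-- what changed: Replaces A's per-index loop with its (i+1)%4 test and per-character concatenation by a while loop that consumes the string in fixed blocks of 4, emitting block[:3].lower()+block[3:4] per block and joining at the end.
import Mathlib
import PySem

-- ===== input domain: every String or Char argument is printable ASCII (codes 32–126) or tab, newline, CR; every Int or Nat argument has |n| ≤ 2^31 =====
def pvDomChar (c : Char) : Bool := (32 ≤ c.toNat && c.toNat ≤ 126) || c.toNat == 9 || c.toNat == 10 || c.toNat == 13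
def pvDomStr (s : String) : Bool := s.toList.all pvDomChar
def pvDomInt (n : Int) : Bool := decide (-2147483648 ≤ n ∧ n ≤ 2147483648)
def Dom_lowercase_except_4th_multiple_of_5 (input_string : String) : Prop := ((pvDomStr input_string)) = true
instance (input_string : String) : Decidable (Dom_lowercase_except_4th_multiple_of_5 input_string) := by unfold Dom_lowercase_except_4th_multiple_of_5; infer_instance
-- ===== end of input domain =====

-- B replaces A's per-index loop with its modulo test by a recursive consumption of the
-- string in blocks of 4 (lower the first 3 chars of each block, keep the 4th); objective: alternative.

-- ===== PORT A =====
def lowercase_except_4th_multiple_of_5 (input_string : String) : String :=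
  if PySem.Int.mod (PySem.Str.len input_string) 5 ≠ 0 then
    PySem.Str.lower input_string
  else
    String.ofList ((PySem.List.pyRange 0 (PySem.Str.len input_string) 1).foldl
      (fun output_string i =>
        if PySem.Int.mod (i + 1) 4 ≠ 0 then
          output_string ++ PySem.Chars.lower [PySem.List.pyGetD input_string.toList i ' ']
        else
          output_string ++ [PySem.List.pyGetD input_string.toList i ' ']) [])

-- ===== PORT B =====
-- the while loop of Source B: consume 'rest' four characters at a time
def pvChunks (rest : List Char) : List Char :=
  if h : rest = [] then []
  else
    PySem.Chars.lower (PySem.List.slice rest none (some 3)) ++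
      PySem.List.slice rest (some 3) (some 4) ++
      pvChunks (PySem.List.slice rest (some 4) none)
termination_by rest.length
decreasing_by
  rw [PySem.List.slice_from rest (by norm_num)]
  have : 0 < rest.length := List.length_pos_iff.mpr h
  simp
  omega

def lowercase_except_4th_multiple_of_5_alt (input_string : String) : String :=
  if PySem.Int.mod (PySem.Str.len input_string) 5 ≠ 0 then
    PySem.Str.lower input_string
  else
    String.ofList (pvChunks input_string.toList)

-- ===== PRECONDITION & SPEC =====
def Spec_lowercase_except_4th_multiple_of_5 (input_string : String) (out : String) : Prop := out = lowercase_except_4th_multiple_of_5_alt input_string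
instance (input_string : String) (out : String) : Decidable (Spec_lowercase_except_4th_multiple_of_5 input_string out) := by unfold Spec_lowercase_except_4th_multiple_of_5; infer_instance

-- ===== CLAIM (what is proved, stated in full; the proofs are below) =====
def Claim_equal_lowercase_except_4th_multiple_of_5 : Prop := ∀ (input_string : String), Dom_lowercase_except_4th_multiple_of_5 input_string → Spec_lowercase_except_4th_multiple_of_5 input_string (lowercase_except_4th_multiple_of_5 input_string)

-- ===== LEMMAS AND PROOFS =====

-- the common characterisation: position s (Python index) lowered unless 4 ∣ s+1
def pvSpec (s : Int) : List Char → List Char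
  | [] => []
  | c :: t => (if (4:Int) ∣ (s + 1) then [c] else [PySem.Chars.lowerChar c]) ++ pvSpec (s + 1) t

theorem pvA_fold_eq (l : List Char) : ∀ (s : Int) (acc : List Char),
    (PySem.List.enumerate l s).foldl
      (fun acc p => if PySem.Int.mod (p.1 + 1) 4 ≠ 0 then acc ++ PySem.Chars.lower [p.2]
                    else acc ++ [p.2]) acc = acc ++ pvSpec s l := by
  induction l with
  | nil => intro s acc; simp [PySem.List.enumerate_nil, pvSpec]
  | cons c t ih =>
    intro s acc
    rw [PySem.List.enumerate_cons, List.foldl_cons, ih]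
    simp only [pvSpec, PySem.Chars.lower, List.map]
    by_cases h : (4:Int) ∣ (s + 1)
    · rw [if_pos h, if_neg (by simp [h])]
      simp
    · rw [if_neg h, if_pos (by simp [h])]
      simp

theorem pvB_eq (n : Nat) : ∀ (l : List Char), l.length ≤ n → ∀ (s : Int), (4:Int) ∣ s →
    pvChunks l = pvSpec s l := by
  induction n with
  | zero =>
    intro l hl s _
    have : l = [] := List.length_eq_zero_iff.mp (Nat.le_zero.mp hl)
    subst this; simp [pvChunks, pvSpec]
  | succ n ih =>
    intro l hl s hs
    have h1 : ¬ (4:Int) ∣ (s + 1) := by omega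
    have h2 : ¬ (4:Int) ∣ (s + 1 + 1) := by omega
    have h3 : ¬ (4:Int) ∣ (s + 1 + 1 + 1) := by omega
    have h4 : (4:Int) ∣ (s + 1 + 1 + 1 + 1) := by omega
    match l with
    | [] => simp [pvChunks, pvSpec]
    | [a] =>
      rw [pvChunks]
      simp [PySem.List.slice_to _ (by norm_num : (0:Int) ≤ 3),
            PySem.List.slice_toNat _ (by norm_num : (0:Int) ≤ 3) (by norm_num : (0:Int) ≤ 4),
            PySem.List.slice_from _ (by norm_num : (0:Int) ≤ 4),
            pvChunks, pvSpec, PySem.Chars.lower, h1]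
    | [a, b] =>
      rw [pvChunks]
      simp [PySem.List.slice_to _ (by norm_num : (0:Int) ≤ 3),
            PySem.List.slice_toNat _ (by norm_num : (0:Int) ≤ 3) (by norm_num : (0:Int) ≤ 4),
            PySem.List.slice_from _ (by norm_num : (0:Int) ≤ 4),
            pvChunks, pvSpec, PySem.Chars.lower, h1, h2]
    | [a, b, c] =>
      rw [pvChunks]
      simp [PySem.List.slice_to _ (by norm_num : (0:Int) ≤ 3),
            PySem.List.slice_toNat _ (by norm_num : (0:Int) ≤ 3) (by norm_num : (0:Int) ≤ 4),
            PySem.List.slice_from _ (by norm_num : (0:Int) ≤ 4),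
            pvChunks, pvSpec, PySem.Chars.lower, h1, h2, h3]
    | a :: b :: c :: d :: t =>
      rw [pvChunks]
      have ht : t.length ≤ n := by simp at hl; omega
      have hrec := ih t ht (s + 1 + 1 + 1 + 1) h4
      simp [PySem.List.slice_to _ (by norm_num : (0:Int) ≤ 3),
            PySem.List.slice_toNat _ (by norm_num : (0:Int) ≤ 3) (by norm_num : (0:Int) ≤ 4),
            PySem.List.slice_from _ (by norm_num : (0:Int) ≤ 4),
            pvSpec, PySem.Chars.lower, h1, h2, h3, h4, hrec]

-- ===== VERDICT (by name: the statement is the Claim_ definition above) =====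
theorem lowercase_except_4th_multiple_of_5_spec : Claim_equal_lowercase_except_4th_multiple_of_5 := by
  intro s _
  unfold Spec_lowercase_except_4th_multiple_of_5
  unfold lowercase_except_4th_multiple_of_5 lowercase_except_4th_multiple_of_5_alt
  split_ifs with hg
  · rfl
  · congr 1
    have hA : (PySem.List.pyRange 0 (PySem.Str.len s) 1).foldl
        (fun output_string i =>
          if PySem.Int.mod (i + 1) 4 ≠ 0 then
            output_string ++ PySem.Chars.lower [PySem.List.pyGetD s.toList i ' ']
          else
            output_string ++ [PySem.List.pyGetD s.toList i ' ']) [] = pvSpec 0 s.toList := by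
      have hmap := PySem.List.enumerate_eq_map_pyRange s.toList ' '
      have : (PySem.List.pyRange 0 (PySem.Str.len s) 1).foldl
          (fun output_string i =>
            if PySem.Int.mod (i + 1) 4 ≠ 0 then
              output_string ++ PySem.Chars.lower [PySem.List.pyGetD s.toList i ' ']
            else
              output_string ++ [PySem.List.pyGetD s.toList i ' ']) []
          = (PySem.List.enumerate s.toList).foldl
              (fun acc p => if PySem.Int.mod (p.1 + 1) 4 ≠ 0 then acc ++ PySem.Chars.lower [p.2]
                            else acc ++ [p.2]) [] := by
        rw [hmap, List.foldl_map]
        simp [PySem.Str.len_eq, PySem.List.len]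
      rw [this, pvA_fold_eq]
      simp
    rw [hA, pvB_eq s.toList.length s.toList (le_refl _) 0 (by omega)]
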